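-- pv_equiv track=rewrite | github.com/alexbourret/dss-plugin-access-importer | python-lib/access_importer_common.py | get_unique_names
-- ===== SOURCE A (Python) =====
-- def get_unique_names(list_of_names):
--     list_unique_slugs = []
--     for name in list_of_names:
--         slug_name = name
--         if slug_name == '':
--             slug_name = 'none'
--         test_string = slug_name
--         index = 0
--         while test_string in list_unique_slugs:
--             index += 1
--             test_string = slug_name + '_' + str(index)
--         list_unique_slugs.append(test_string)
--     return list_unique_slugs
-- ===== SOURCE B (Python) =====
-- def get_unique_names(list_of_names):
--     used = set()
--     next_index = {}
--     result = []
--     for name in list_of_names: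
--         base = name if name != '' else 'none'
--         if base not in used:
--             slug = base
--         else:
--             i = next_index.get(base, 1)
--             while base + '_' + str(i) in used:
--                 i += 1
--             slug = base + '_' + str(i)
--             next_index[base] = i + 1
--         used.add(slug)
--         result.append(slug)
--     return result
-- ===== Notes on version B (the rewrite author's own statement) =====
-- stated objective: faster
-- what changed: Replaces the list-membership probe that restarts at index 1 on every name with a set for O(1) membership plus a per-base next-index cache, so each suffix index per base is probed at most once (O(n) amortized instead of quadratic-or-worse restarts over the growing result list).
import Mathlib
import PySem

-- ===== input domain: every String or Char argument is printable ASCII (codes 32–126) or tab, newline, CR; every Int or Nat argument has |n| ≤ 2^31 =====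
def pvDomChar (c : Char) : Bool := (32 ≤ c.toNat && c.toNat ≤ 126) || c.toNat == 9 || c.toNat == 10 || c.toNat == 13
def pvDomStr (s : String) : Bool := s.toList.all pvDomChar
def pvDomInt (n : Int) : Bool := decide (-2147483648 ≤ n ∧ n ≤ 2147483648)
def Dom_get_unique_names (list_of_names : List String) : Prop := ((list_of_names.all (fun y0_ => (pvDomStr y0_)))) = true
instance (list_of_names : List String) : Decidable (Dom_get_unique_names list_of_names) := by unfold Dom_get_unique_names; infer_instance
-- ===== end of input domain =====

-- B replaces A's probe loop (which rescans the growing result list from index 1 for every name)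
-- by a set for membership plus a per-base next-index cache; objective: faster (asymptotic).

-- ===== PORT A =====
-- the 'while test_string in list_unique_slugs' loop; fuel (one more than the list length)
-- only bounds the recursion, a free candidate is always found within it
def pvWhileA (slugs : List String) (slug_name test_string : String) (index : Int) : Nat → String
  | 0 => test_string
  | fuel + 1 =>
    if test_string ∈ slugs then
      pvWhileA slugs slug_name (slug_name ++ "_" ++ PySem.Int.toStr (index + 1)) (index + 1) fuel
    else test_string

def pvStepA (list_unique_slugs : List String) (name : String) : List String :=
  let slug_name := if name = "" then "none" else name
  let test_string := pvWhileA list_unique_slugs slug_name slug_name 0 (list_unique_slugs.length + 1)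
  list_unique_slugs ++ [test_string]

def get_unique_names (list_of_names : List String) : List String :=
  list_of_names.foldl pvStepA []

-- ===== PORT B =====
-- the 'while base + '_' + str(i) in used' loop of B, returning the first free index i;
-- fuel only bounds the recursion
def pvProbeB (used : PySem.Set String) (base : String) (i : Int) : Nat → Int
  | 0 => i
  | fuel + 1 =>
    if (base ++ "_" ++ PySem.Int.toStr i) ∈ used then pvProbeB used base (i + 1) fuel else i

def pvStepB (st : List String × PySem.Set String × PySem.Dict String Int) (name : String) :
    List String × PySem.Set String × PySem.Dict String Int :=
  let result := st.1
  let used := st.2.1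
  let next_index := st.2.2
  let base := if name = "" then "none" else name
  if base ∈ used then
    let i := pvProbeB used base (next_index.getD base 1) (used.length + 1)
    let slug := base ++ "_" ++ PySem.Int.toStr i
    (result ++ [slug], PySem.Set.add used slug, next_index.insert base (i + 1))
  else
    (result ++ [base], PySem.Set.add used base, next_index)

def get_unique_names_alt (list_of_names : List String) : List String :=
  (list_of_names.foldl pvStepB ([], PySem.Set.empty, PySem.Dict.empty)).1

-- ===== PRECONDITION & SPEC =====
def Spec_get_unique_names (list_of_names : List String) (out : List String) : Prop := out = get_unique_names_alt list_of_names
instance (list_of_names : List String) (out : List String) : Decidable (Spec_get_unique_names list_of_names out) := by unfold Spec_get_unique_names; infer_instance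

-- ===== CLAIM (what is proved, stated in full; the proofs are below) =====
def Claim_equal_get_unique_names : Prop := ∀ (list_of_names : List String), Dom_get_unique_names list_of_names → Spec_get_unique_names list_of_names (get_unique_names list_of_names)

-- ===== LEMMAS AND PROOFS =====

-- the i-th candidate slug for a base string
def pvCand (b : String) (i : Int) : String :=
  if i = 0 then b else b ++ "_" ++ PySem.Int.toStr i

theorem pv_toDigitsCore_eq (f : Nat) : ∀ (n : Nat) (l : List Char), 0 < n → n < f →
    Nat.toDigitsCore 10 f n l = ((Nat.digits 10 n).map Nat.digitChar).reverse ++ l := by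
  induction f with
  | zero => intro n l hn hf; omega
  | succ f ih =>
    intro n l hn hf
    rw [Nat.toDigitsCore]
    by_cases h10 : n / 10 = 0
    · rw [if_pos h10]
      rw [Nat.digits_def' (by norm_num : 1 < 10) hn, h10]
      simp
    · rw [if_neg h10]
      rw [ih (n / 10) _ (Nat.pos_of_ne_zero h10) (by omega : n / 10 < f)]
      rw [Nat.digits_def' (by norm_num : 1 < 10) hn]
      simp

theorem pv_digitChar_inj (x y : Nat) (hx : x < 10) (hy : y < 10)
    (h : Nat.digitChar x = Nat.digitChar y) : x = y := by
  interval_cases x <;> interval_cases y <;> simp_all [Nat.digitChar]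

theorem pv_map_digitChar_inj : ∀ (l1 l2 : List Nat), (∀ x ∈ l1, x < 10) → (∀ x ∈ l2, x < 10) →
    l1.map Nat.digitChar = l2.map Nat.digitChar → l1 = l2 := by
  intro l1
  induction l1 with
  | nil => intro l2 _ _ h; cases l2 <;> simp_all
  | cons a t ih =>
    intro l2 h1 h2 h
    cases l2 with
    | nil => simp_all
    | cons b u =>
      simp only [List.map_cons, List.cons.injEq] at h
      have ha := pv_digitChar_inj a b (h1 a (by simp)) (h2 b (by simp)) h.1
      have := ih u (fun x hx => h1 x (by simp [hx])) (fun x hx => h2 x (by simp [hx])) h.2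
      simp [ha, this]

theorem pv_toChars_inj_pos (a b : Int) (ha : 0 < a) (hb : 0 < b)
    (h : PySem.Int.toChars a = PySem.Int.toChars b) : a = b := by
  rw [PySem.Int.toChars, PySem.Int.toChars, if_neg (by omega), if_neg (by omega)] at h
  rw [Nat.toDigits, Nat.toDigits] at h
  rw [pv_toDigitsCore_eq _ _ _ (by omega) (by omega),
      pv_toDigitsCore_eq _ _ _ (by omega) (by omega)] at h
  simp only [List.append_nil] at h
  have h2 := List.reverse_injective h
  have h3 := pv_map_digitChar_inj _ _
    (fun x hx => Nat.digits_lt_base (by norm_num) hx)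
    (fun x hx => Nat.digits_lt_base (by norm_num) hx) h2
  have h4 : a.toNat = b.toNat := by
    have := congrArg (Nat.ofDigits 10) h3
    simpa [Nat.ofDigits_digits] using this
  omega

theorem pv_toStr_toList_pos (i : Int) : (PySem.Int.toStr i).toList = PySem.Int.toChars i :=
  PySem.Int.toList_toStr i

theorem pv_cand_inj (b : String) {i j : Int} (hi : 0 ≤ i) (hj : 0 ≤ j)
    (h : pvCand b i = pvCand b j) : i = j := by
  unfold pvCand at h
  by_cases hi0 : i = 0 <;> by_cases hj0 : j = 0
  · omega
  · rw [if_pos hi0, if_neg hj0] at h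
    have := congrArg String.toList h
    simp only [String.toList_append] at this
    have hlen := congrArg List.length this
    simp at hlen
  · rw [if_neg hi0, if_pos hj0] at h
    have := congrArg String.toList h
    simp only [String.toList_append] at this
    have hlen := congrArg List.length this
    simp at hlen
  · rw [if_neg hi0, if_neg hj0] at h
    have := congrArg String.toList h
    simp only [String.toList_append] at this
    rw [pv_toStr_toList_pos, pv_toStr_toList_pos] at this
    exact pv_toChars_inj_pos i j (by omega) (by omega) (List.append_cancel_left this)

-- the unified probe loop both ports reduce to
def pvFF (used : List String) (b : String) : Int → Nat → Int
  | i, 0 => i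
  | i, fuel + 1 => if pvCand b i ∈ used then pvFF used b (i + 1) fuel else i

theorem pv_whileA_eq (used : List String) (b : String) :
    ∀ (fuel : Nat) (i : Int), 0 ≤ i →
    pvWhileA used b (pvCand b i) i fuel = pvCand b (pvFF used b i fuel) := by
  intro fuel
  induction fuel with
  | zero => intro i _; rfl
  | succ fuel ih =>
    intro i hi
    rw [pvWhileA, pvFF]
    by_cases hmem : pvCand b i ∈ used
    · rw [if_pos hmem, if_pos hmem]
      have hnext : b ++ "_" ++ PySem.Int.toStr (i + 1) = pvCand b (i + 1) := by
        rw [pvCand, if_neg (by omega)]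
      rw [hnext]
      exact ih (i + 1) (by omega)
    · rw [if_neg hmem, if_neg hmem]

theorem pv_probeB_eq (used : List String) (b : String) :
    ∀ (fuel : Nat) (i : Int), 1 ≤ i →
    pvProbeB used b i fuel = pvFF used b i fuel := by
  intro fuel
  induction fuel with
  | zero => intro i _; rfl
  | succ fuel ih =>
    intro i hi
    rw [pvProbeB, pvFF]
    have hc : b ++ "_" ++ PySem.Int.toStr i = pvCand b i := by rw [pvCand, if_neg (by omega)]
    rw [hc]
    by_cases hmem : pvCand b i ∈ used
    · rw [if_pos hmem, if_pos hmem]; exact ih (i + 1) (by omega)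
    · rw [if_neg hmem, if_neg hmem]

theorem pv_ff_spec (used : List String) (b : String) :
    ∀ (fuel : Nat) (i j : Int), i ≤ j → pvCand b j ∉ used →
    (∀ t : Int, i ≤ t → t < j → pvCand b t ∈ used) → j - i < fuel →
    pvFF used b i fuel = j := by
  intro fuel
  induction fuel with
  | zero => intro i j _ _ _ h; omega
  | succ fuel ih =>
    intro i j hij hfree hmin hfuel
    rw [pvFF]
    by_cases hmem : pvCand b i ∈ used
    · rw [if_pos hmem]
      have hne : i ≠ j := by rintro rfl; exact hfree hmem
      exact ih (i + 1) j (by omega) hfree (fun t ht1 ht2 => hmin t (by omega) ht2) (by omega)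
    · rw [if_neg hmem]
      by_cases hij' : i = j
      · exact hij'
      · exact absurd (hmin i le_rfl (by omega)) hmem

theorem pv_exists_free (used : List String) (b : String) (i : Int) (hi : 0 ≤ i) :
    ∃ m : Nat, m ≤ used.length ∧ pvCand b (i + m) ∉ used := by
  by_contra hcon
  push_neg at hcon
  have hsub : ((List.range (used.length + 1)).map (fun (m : Nat) => pvCand b (i + (m : Int)))) ⊆ used := by
    intro x hx
    simp only [List.mem_map, List.mem_range] at hx
    obtain ⟨m, hm, rfl⟩ := hx
    exact hcon m (by omega)
  have hnd : ((List.range (used.length + 1)).map (fun (m : Nat) => pvCand b (i + (m : Int)))).Nodup := by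
    have hinj : ∀ x ∈ List.range (used.length + 1), ∀ y ∈ List.range (used.length + 1),
        pvCand b (i + (x : Int)) = pvCand b (i + (y : Int)) → x = y := by
      intro x _ y _ hxy
      have := pv_cand_inj b (i := i + (x : Int)) (j := i + (y : Int)) (by omega) (by omega) hxy
      omega
    exact List.Nodup.map_on hinj List.nodup_range
  have := (List.subperm_of_subset hnd hsub).length_le
  simp at this

-- invariant tying B's next-index cache to the used set
def pvInv (used : List String) (nxt : PySem.Dict String Int) : Prop :=
  ∀ b v, nxt.get? b = some v → 1 ≤ v ∧ ∀ k : Int, 1 ≤ k → k < v → pvCand b k ∈ used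

theorem pv_inv_append (used : List String) (xs : List String) (nxt : PySem.Dict String Int)
    (h : pvInv used nxt) : pvInv (used ++ xs) nxt := by
  intro b v hv
  exact ⟨(h b v hv).1, fun k hk1 hk2 => List.mem_append_left _ ((h b v hv).2 k hk1 hk2)⟩

theorem pv_step_eq (acc : List String) (nxt : PySem.Dict String Int) (hInv : pvInv acc nxt)
    (name : String) :
    ∃ nxt', pvStepB (acc, acc, nxt) name = (pvStepA acc name, pvStepA acc name, nxt') ∧
      pvInv (pvStepA acc name) nxt' := by
  set base := if name = "" then "none" else name with hbase
  have hQ : ∃ m : Nat, pvCand base (m : Int) ∉ acc := by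
    obtain ⟨m, _, hm⟩ := pv_exists_free acc base 0 le_rfl
    exact ⟨m, by simpa using hm⟩
  set j := Nat.find hQ with hj
  have hjfree : pvCand base (j : Int) ∉ acc := Nat.find_spec hQ
  have hjmin : ∀ t : Int, 0 ≤ t → t < (j : Int) → pvCand base t ∈ acc := by
    intro t ht1 ht2
    have hlt : t.toNat < j := by omega
    have := Nat.find_min hQ hlt
    rw [not_not] at this
    rwa [Int.toNat_of_nonneg ht1] at this
  have hjle : j ≤ acc.length := by
    obtain ⟨m, hmle, hm⟩ := pv_exists_free acc base 0 le_rfl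
    have : j ≤ m := Nat.find_le (by simpa using hm)
    omega
  -- A's step appends the j-th candidate
  have hA : pvStepA acc name = acc ++ [pvCand base (j : Int)] := by
    rw [pvStepA]
    have hb0 : base = pvCand base 0 := by rw [pvCand]; simp
    simp only [← hbase]
    rw [show pvWhileA acc base base 0 (acc.length + 1)
          = pvWhileA acc base (pvCand base 0) 0 (acc.length + 1) by rw [← hb0]]
    rw [pv_whileA_eq acc base (acc.length + 1) 0 le_rfl]
    rw [pv_ff_spec acc base (acc.length + 1) 0 (j : Int) (by omega) hjfree
        (fun t ht1 ht2 => hjmin t ht1 ht2) (by omega)]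
  by_cases hmem : base ∈ acc
  · -- collision branch
    have hj1 : 1 ≤ (j : Int) := by
      rcases Nat.eq_zero_or_pos j with h0 | h0
      · exfalso
        apply hjfree
        rw [h0]
        simpa [pvCand] using hmem
      · omega
    set s := nxt.getD base 1 with hs
    have hsfacts : 1 ≤ s ∧ ∀ k : Int, 0 ≤ k → k < s → pvCand base k ∈ acc := by
      rcases hget : nxt.get? base with _ | v
      · constructor
        · rw [hs, PySem.Dict.getD_eq_get?_getD, hget]; simp
        · intro k hk1 hk2
          rw [hs, PySem.Dict.getD_eq_get?_getD, hget] at hk2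
          simp at hk2
          have hk0 : k = 0 := by omega
          rw [hk0]
          simpa [pvCand] using hmem
      · have hv := hInv base v hget
        have hsv : s = v := by rw [hs, PySem.Dict.getD_eq_get?_getD, hget]; rfl
        constructor
        · omega
        · intro k hk1 hk2
          by_cases hk0 : k = 0
          · rw [hk0]; simpa [pvCand] using hmem
          · exact hv.2 k (by omega) (by omega)
    have hsj : s ≤ (j : Int) := by
      by_contra hcon
      exact hjfree (hsfacts.2 (j : Int) (by omega) (by omega))
    have hprobe : pvProbeB acc base s (acc.length + 1) = (j : Int) := by
      rw [pv_probeB_eq acc base (acc.length + 1) s hsfacts.1]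
      exact pv_ff_spec acc base (acc.length + 1) s (j : Int) hsj hjfree
        (fun t ht1 ht2 => hjmin t (by omega) ht2) (by omega)
    have hslug : base ++ "_" ++ PySem.Int.toStr (j : Int) = pvCand base (j : Int) := by
      rw [pvCand, if_neg (by omega)]
    refine ⟨nxt.insert base ((j : Int) + 1), ?_, ?_⟩
    · rw [pvStepB]
      simp only [← hbase]
      rw [if_pos hmem, hprobe, hslug, hA]
      have hadd : PySem.Set.add acc (pvCand base (j : Int)) = acc ++ [pvCand base (j : Int)] := by
        rw [PySem.Set.add]
        rw [if_neg (by simpa [PySem.Set.contains] using hjfree)]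
      rw [hadd]
    · rw [hA]
      intro b v hget
      rw [PySem.Dict.get?_insert] at hget
      by_cases hb : b = base
      · rw [if_pos hb] at hget
        have hv : v = (j : Int) + 1 := by injection hget with h; omega
        subst hb
        refine ⟨by omega, fun k hk1 hk2 => ?_⟩
        by_cases hkj : k = (j : Int)
        · rw [hkj]; exact List.mem_append_right _ (by simp)
        · exact List.mem_append_left _ (hjmin k (by omega) (by omega))
      · rw [if_neg hb] at hget
        have := hInv b v hget
        exact ⟨this.1, fun k hk1 hk2 => List.mem_append_left _ (this.2 k hk1 hk2)⟩
  · -- fresh base: j = 0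
    have hj0 : j = 0 := by
      rw [hj, Nat.find_eq_zero]
      simpa [pvCand] using hmem
    refine ⟨nxt, ?_, ?_⟩
    · rw [pvStepB]
      simp only [← hbase]
      rw [if_neg hmem, hA, hj0]
      have hc0 : pvCand base 0 = base := by rw [pvCand]; simp
      have hadd : PySem.Set.add acc base = acc ++ [base] := by
        rw [PySem.Set.add]
        rw [if_neg (by simpa [PySem.Set.contains] using hmem)]
      simp only [Nat.cast_zero, hc0, hadd]
    · rw [hA]
      exact pv_inv_append acc _ nxt hInv

theorem pv_main : ∀ (names : List String) (acc : List String) (nxt : PySem.Dict String Int),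
    pvInv acc nxt → (names.foldl pvStepB (acc, acc, nxt)).1 = names.foldl pvStepA acc := by
  intro names
  induction names with
  | nil => intro acc nxt _; rfl
  | cons name rest ih =>
    intro acc nxt hInv
    obtain ⟨nxt', hstep, hInv'⟩ := pv_step_eq acc nxt hInv name
    rw [List.foldl_cons, List.foldl_cons, hstep]
    exact ih (pvStepA acc name) nxt' hInv'

-- ===== VERDICT (by name: the statement is the Claim_ definition above) =====
theorem get_unique_names_spec : Claim_equal_get_unique_names := by
  intro l _
  unfold Spec_get_unique_names get_unique_names get_unique_names_alt
  have hInv : pvInv PySem.Set.empty PySem.Dict.empty := by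
    intro b v hv
    rw [PySem.Dict.get?_empty] at hv
    cases hv
  exact (pv_main l [] PySem.Dict.empty hInv).symm
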